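-- pv_equiv track=rewrite | github.com/olojiang/writing_cli | src/iiif_stitcher/core.py | plan_tiles
-- ===== SOURCE A (Python) =====
-- class StitcherError(RuntimeError):
--     """Domain error for IIIF stitching pipeline."""
--
-- TileRegion = tuple[int, int, int, int]
--
-- def plan_tiles(width: int, height: int, tile_width: int, tile_height: int) -> list[TileRegion]:
--     if width <= 0 or height <= 0:
--         raise StitcherError("width/height must be positive")
--     if tile_width <= 0 or tile_height <= 0:
--         raise StitcherError("tile_width/tile_height must be positive")
--
--     regions: list[TileRegion] = []
--     y = 0
--     while y < height:
--         h = min(tile_height, height - y)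
--         x = 0
--         while x < width:
--             w = min(tile_width, width - x)
--             regions.append((x, y, w, h))
--             x += tile_width
--         y += tile_height
--     return regions
-- ===== SOURCE B (Python) =====
-- class StitcherError(RuntimeError):
--     """Domain error for IIIF stitching pipeline."""
--
-- TileRegion = tuple[int, int, int, int]
--
-- def plan_tiles(width: int, height: int, tile_width: int, tile_height: int) -> list[TileRegion]:
--     if width <= 0 or height <= 0:
--         raise StitcherError("width/height must be positive")
--     if tile_width <= 0 or tile_height <= 0:
--         raise StitcherError("tile_width/tile_height must be positive")
--
--     # Closed-form grid: nx*ny tiles counted by ceiling division; every tile is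
--     # full-size except in the last column/row, which takes the remainder.
--     # One flat pass decodes each tile index k into (row j, column i) by divmod.
--     nx = -(-width // tile_width)
--     ny = -(-height // tile_height)
--
--     def region(k: int) -> TileRegion:
--         j, i = divmod(k, nx)
--         x = i * tile_width
--         y = j * tile_height
--         w = tile_width if i + 1 < nx else width - x
--         h = tile_height if j + 1 < ny else height - y
--         return (x, y, w, h)
--
--     return [region(k) for k in range(nx * ny)]
-- ===== Notes on version B (the rewrite author's own statement) =====
-- stated objective: alternative
-- what changed: Replaces A's nested while-loops (which walk pixel offsets and clamp every tile with min) by a closed-form grid: tile counts nx, ny via ceiling division, one flat pass over range(nx*ny) decoding each index by divmod, with only the last column/row taking the remainder width/height instead of a per-tile min.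
import Mathlib
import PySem

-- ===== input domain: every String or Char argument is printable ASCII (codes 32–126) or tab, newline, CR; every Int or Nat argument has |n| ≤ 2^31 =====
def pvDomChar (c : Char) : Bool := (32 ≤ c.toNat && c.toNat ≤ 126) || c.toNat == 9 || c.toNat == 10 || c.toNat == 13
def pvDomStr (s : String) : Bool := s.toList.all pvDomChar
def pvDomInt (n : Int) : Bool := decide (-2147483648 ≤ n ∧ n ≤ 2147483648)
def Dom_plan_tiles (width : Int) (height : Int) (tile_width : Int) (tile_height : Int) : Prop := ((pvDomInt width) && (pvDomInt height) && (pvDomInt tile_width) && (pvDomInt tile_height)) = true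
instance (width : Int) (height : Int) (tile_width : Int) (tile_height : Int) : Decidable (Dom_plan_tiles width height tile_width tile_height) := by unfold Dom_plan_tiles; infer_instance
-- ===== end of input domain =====

-- B replaces A's nested while loops over pixel offsets with a closed-form grid:
-- tile counts via ceiling division and one flat loop decoding each index by divmod;
-- objective: alternative. A raises StitcherError on non-positive sizes; Pre_ excludes
-- exactly those inputs.


-- ===== PORT A =====
-- inner `while x < width` loop of A
def planRowA (width tile_width y h : Int) (htw : 0 < tile_width) (x : Int)
    (acc : List (Int × Int × Int × Int)) : List (Int × Int × Int × Int) :=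
  if hx : x < width then
    planRowA width tile_width y h htw (x + tile_width)
      (acc ++ [(x, y, min tile_width (width - x), h)])
  else acc
termination_by (width - x).toNat
decreasing_by omega

-- outer `while y < height` loop of A
def planRowsA (width height tile_width tile_height : Int)
    (htw : 0 < tile_width) (hth : 0 < tile_height) (y : Int)
    (acc : List (Int × Int × Int × Int)) : List (Int × Int × Int × Int) :=
  if hy : y < height then
    planRowsA width height tile_width tile_height htw hth (y + tile_height)
      (planRowA width tile_width y (min tile_height (height - y)) htw 0 acc)
  else acc
termination_by (height - y).toNat
decreasing_by omega

def plan_tiles (width : Int) (height : Int) (tile_width : Int) (tile_height : Int) : List (Int × Int × Int × Int) :=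
  if width ≤ 0 ∨ height ≤ 0 then []          -- raise StitcherError (excluded by Pre_)
  else if h2 : tile_width ≤ 0 ∨ tile_height ≤ 0 then []  -- raise StitcherError (excluded by Pre_)
  else planRowsA width height tile_width tile_height (by omega) (by omega) 0 []

-- ===== PORT B =====
def plan_tiles_alt (width : Int) (height : Int) (tile_width : Int) (tile_height : Int) : List (Int × Int × Int × Int) :=
  if width ≤ 0 ∨ height ≤ 0 then []          -- raise StitcherError (excluded by Pre_)
  else if tile_width ≤ 0 ∨ tile_height ≤ 0 then []  -- raise StitcherError (excluded by Pre_)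
  else
    let nx := -(PySem.Int.floordiv (-width) tile_width)
    let ny := -(PySem.Int.floordiv (-height) tile_height)
    (PySem.List.pyRange 0 (nx * ny) 1).map (fun k =>
      let j := PySem.Int.floordiv k nx   -- j, i = divmod(k, nx)
      let i := PySem.Int.mod k nx
      let x := i * tile_width
      let y := j * tile_height
      let w := if i + 1 < nx then tile_width else width - x
      let h := if j + 1 < ny then tile_height else height - y
      (x, y, w, h))

-- ===== PRECONDITION & SPEC =====
-- Pre_ excludes exactly the inputs where A raises StitcherError (non-positive sizes).
def Pre_plan_tiles (width : Int) (height : Int) (tile_width : Int) (tile_height : Int) : Prop :=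
  0 < width ∧ 0 < height ∧ 0 < tile_width ∧ 0 < tile_height
instance (width : Int) (height : Int) (tile_width : Int) (tile_height : Int) : Decidable (Pre_plan_tiles width height tile_width tile_height) := by unfold Pre_plan_tiles; infer_instance
def pvWitness_plan_tiles : Int × Int × Int × Int := (5, 3, 2, 2)

def Spec_plan_tiles (width : Int) (height : Int) (tile_width : Int) (tile_height : Int) (out : List (Int × Int × Int × Int)) : Prop := out = plan_tiles_alt width height tile_width tile_height
instance (width : Int) (height : Int) (tile_width : Int) (tile_height : Int) (out : List (Int × Int × Int × Int)) : Decidable (Spec_plan_tiles width height tile_width tile_height out) := by unfold Spec_plan_tiles; infer_instance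

-- ===== CLAIM (what is proved, stated in full; the proofs are below) =====
def Claim_equal_plan_tiles : Prop := ∀ (width : Int) (height : Int) (tile_width : Int) (tile_height : Int), Dom_plan_tiles width height tile_width tile_height → Pre_plan_tiles width height tile_width tile_height → Spec_plan_tiles width height tile_width tile_height (plan_tiles width height tile_width tile_height)

-- ===== LEMMAS AND PROOFS =====

-- A's loops produce the canonical flatMap-over-pyRange normal form.
theorem pyRange_pos_cons {a b s : Int} (hs : 0 < s) (hab : a < b) :
    PySem.List.pyRange a b s = a :: PySem.List.pyRange (a + s) b s := by
  rw [PySem.List.pyRange_of_pos _ _ hs, PySem.List.pyRange_of_pos _ _ hs]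
  have hq : 0 ≤ (b - (a + s) + s - 1) / s := by
    apply Int.ediv_nonneg <;> omega
  have key : (b - a + s - 1) / s = (b - (a + s) + s - 1) / s + 1 := by
    have h1 : b - a + s - 1 = (b - (a + s) + s - 1) + 1 * s := by ring
    rw [h1, Int.add_mul_ediv_right _ _ (ne_of_gt hs)]
  rw [if_pos hab, key]
  have htn : (((b - (a + s) + s - 1) / s) + 1).toNat
      = ((b - (a + s) + s - 1) / s).toNat + 1 := by omega
  rw [htn]
  by_cases h2 : a + s < b
  · rw [if_pos h2, List.range_succ_eq_map, List.map_cons, List.map_map]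
    congr 1
    · omega
    · apply List.map_congr_left
      intro k _
      simp [Function.comp]
      ring
  · rw [if_neg h2]
    have hz : (b - (a + s) + s - 1) / s = 0 := by
      apply Int.ediv_eq_zero_of_lt <;> omega
    rw [hz]
    simp

theorem planRowA_spec (width tile_width y h : Int) (htw : 0 < tile_width) :
    ∀ (x : Int) (acc : List (Int × Int × Int × Int)),
      planRowA width tile_width y h htw x acc
        = acc ++ (PySem.List.pyRange x width tile_width).map
            (fun x' => (x', y, min tile_width (width - x'), h)) := by
  intro x acc
  induction x, acc using planRowA.induct width tile_width y h htw with
  | case1 x acc hx ih =>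
    rw [planRowA, dif_pos hx, ih, pyRange_pos_cons htw hx]
    simp
  | case2 x acc hx =>
    rw [planRowA, dif_neg hx, PySem.List.pyRange_of_pos _ _ htw, if_neg hx]
    simp

theorem planRowsA_spec (width height tile_width tile_height : Int)
    (htw : 0 < tile_width) (hth : 0 < tile_height) :
    ∀ (y : Int) (acc : List (Int × Int × Int × Int)),
      planRowsA width height tile_width tile_height htw hth y acc
        = acc ++ (PySem.List.pyRange y height tile_height).flatMap
            (fun y' => (PySem.List.pyRange 0 width tile_width).map
              (fun x => (x, y', min tile_width (width - x), min tile_height (height - y')))) := by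
  intro y acc
  induction y, acc using planRowsA.induct width height tile_width tile_height htw hth with
  | case1 y acc hy ih =>
    rw [planRowsA, dif_pos hy, ih, planRowA_spec, pyRange_pos_cons hth hy]
    simp
  | case2 y acc hy =>
    rw [planRowsA, dif_neg hy, PySem.List.pyRange_of_pos _ _ hth, if_neg hy]
    simp

-- the ceiling count -((-b)//s) equals the count (b+s-1)/s used in pyRange_of_pos
theorem ceil_count_eq (b s : Int) (hs : 0 < s) :
    -(PySem.Int.floordiv (-b) s) = (b + s - 1) / s := by
  rw [PySem.Int.neg_floordiv_neg_eq_iff_of_pos hs]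
  have h1 := Int.mul_ediv_add_emod (b + s - 1) s
  have h2 := Int.emod_nonneg (b + s - 1) (ne_of_gt hs)
  have h3 := Int.emod_lt_of_pos (b + s - 1) hs
  constructor <;> nlinarith [h1, h2, h3]

-- flat enumeration of n*m indices = nested enumeration (row-major)
theorem range_mul_flat {α : Type} (n m : Nat) (g : Nat → α) :
    (List.range (n * m)).map g
      = (List.range m).flatMap (fun j => (List.range n).map (fun i => g (j * n + i))) := by
  induction m with
  | zero => simp
  | succ m ih =>
    rw [Nat.mul_succ, List.range_add, List.map_append, ih, List.range_succ,
      List.flatMap_append]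
    simp [List.map_map, Function.comp, Nat.mul_comm]

-- ===== VERDICT (by name: the statement is the Claim_ definition above) =====
theorem plan_tiles_spec : Claim_equal_plan_tiles := by
  intro width height tile_width tile_height _ hpre
  obtain ⟨hw, hh, htw, hth⟩ := hpre
  unfold Spec_plan_tiles plan_tiles plan_tiles_alt
  rw [if_neg (by omega), dif_neg (by omega), if_neg (by omega), if_neg (by omega)]
  rw [planRowsA_spec]
  simp only [List.nil_append]
  set nx := -(PySem.Int.floordiv (-width) tile_width) with hnx
  set ny := -(PySem.Int.floordiv (-height) tile_height) with hny
  have hnxb : (nx - 1) * tile_width < width ∧ width ≤ nx * tile_width :=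
    (PySem.Int.neg_floordiv_neg_eq_iff_of_pos htw).mp rfl
  have hnyb : (ny - 1) * tile_height < height ∧ height ≤ ny * tile_height :=
    (PySem.Int.neg_floordiv_neg_eq_iff_of_pos hth).mp rfl
  have hnxpos : 0 < nx := by nlinarith [hnxb.2]
  have hnypos : 0 < ny := by nlinarith [hnyb.2]
  have hnxe : nx = (width + tile_width - 1) / tile_width := ceil_count_eq _ _ htw
  have hnye : ny = (height + tile_height - 1) / tile_height := ceil_count_eq _ _ hth
  -- rewrite both sides as maps over List.range
  rw [PySem.List.pyRange_of_pos _ _ hth, if_pos (by omega),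
      PySem.List.pyRange_of_pos _ _ htw, if_pos (by omega),
      PySem.List.pyRange_one]
  have hprod : (nx * ny - 0).toNat = nx.toNat * ny.toNat := by
    have h : nx * ny = ((nx.toNat * ny.toNat : Nat) : Int) := by
      push_cast
      rw [Int.toNat_of_nonneg (le_of_lt hnxpos), Int.toNat_of_nonneg (le_of_lt hnypos)]
    rw [Int.sub_zero, h, Int.toNat_natCast]
  have hNy : ((height - 0 + tile_height - 1) / tile_height).toNat = ny.toNat := by
    rw [hnye]; ring_nf
  have hNx : ((width - 0 + tile_width - 1) / tile_width).toNat = nx.toNat := by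
    rw [hnxe]; ring_nf
  rw [hprod, hNy, hNx, range_mul_flat, List.map_flatMap, List.flatMap_map]
  apply List.flatMap_congr
  intro j hj
  rw [List.map_map, List.map_map]
  apply List.map_congr_left
  intro i hi
  simp only [Function.comp_apply]
  have hiLt : (i : Int) < nx := by
    have := List.mem_range.mp hi
    omega
  have hjk : ((j * nx.toNat + i : Nat) : Int) = (i : Int) + (j : Int) * nx := by
    push_cast
    rw [Int.toNat_of_nonneg (le_of_lt hnxpos)]
    ring
  have hdiv : PySem.Int.floordiv (0 + ((j * nx.toNat + i : Nat) : Int)) nx = (j : Int) := by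
    rw [PySem.Int.floordiv_eq_ediv_of_pos hnxpos, Int.zero_add, hjk,
        Int.add_mul_ediv_right _ _ (ne_of_gt hnxpos),
        Int.ediv_eq_zero_of_lt (Int.natCast_nonneg i) hiLt, Int.zero_add]
  have hmod : PySem.Int.mod (0 + ((j * nx.toNat + i : Nat) : Int)) nx = (i : Int) := by
    rw [PySem.Int.mod_eq_emod_of_pos hnxpos, Int.zero_add, hjk,
        Int.add_mul_emod_self_right, Int.emod_eq_of_lt (Int.natCast_nonneg i) hiLt]
  simp only [hdiv, hmod]
  have hjLt : (j : Int) < ny := by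
    have := List.mem_range.mp hj
    omega
  have e1 : 0 + tile_width * (i : Int) = (i : Int) * tile_width := by ring
  have e2 : 0 + tile_height * (j : Int) = (j : Int) * tile_height := by ring
  rw [e1, e2]
  have ew : min tile_width (width - (i : Int) * tile_width)
      = if (i : Int) + 1 < nx then tile_width else width - (i : Int) * tile_width := by
    split_ifs with hcase
    · have : ((i : Int) + 1) * tile_width ≤ (nx - 1) * tile_width :=
        mul_le_mul_of_nonneg_right (by omega) (le_of_lt htw)
      have : tile_width ≤ width - (i : Int) * tile_width := by nlinarith [hnxb.1]
      omega
    · have hieq : (i : Int) = nx - 1 := by omega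
      have : width - (i : Int) * tile_width ≤ tile_width := by
        rw [hieq]; nlinarith [hnxb.2]
      omega
  have eh : min tile_height (height - (j : Int) * tile_height)
      = if (j : Int) + 1 < ny then tile_height else height - (j : Int) * tile_height := by
    split_ifs with hcase
    · have : ((j : Int) + 1) * tile_height ≤ (ny - 1) * tile_height :=
        mul_le_mul_of_nonneg_right (by omega) (le_of_lt hth)
      have : tile_height ≤ height - (j : Int) * tile_height := by nlinarith [hnyb.1]
      omega
    · have hjeq : (j : Int) = ny - 1 := by omega
      have : height - (j : Int) * tile_height ≤ tile_height := by
        rw [hjeq]; nlinarith [hnyb.2]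
      omega
  rw [ew, eh]
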